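-- pv_equiv track=rewrite | github.com/usacpcheung/timetabling-app | app.py | _compute_slot_label_map
-- ===== SOURCE A (Python) =====
-- def _compute_slot_label_map(slot_count, slot_times, slot_duration):
--     labels = {}
--     last_start = None
--     for idx in range(slot_count):
--         if idx < len(slot_times):
--             try:
--                 hours, minutes = map(int, str(slot_times[idx]).split(':'))
--                 start = hours * 60 + minutes
--             except Exception:
--                 start = (last_start + slot_duration) if last_start is not None else 8 * 60 + 30
--         else:
--             start = (last_start + slot_duration) if last_start is not None else 8 * 60 + 30
--         end = start + slot_duration
--         labels[idx] = f"{start // 60:02d}:{start % 60:02d}-{end // 60:02d}:{end % 60:02d}"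
--         last_start = start
--     return labels
-- ===== SOURCE B (Python) =====
-- def _fmt_label(start, slot_duration):
--     end = start + slot_duration
--     return f"{start // 60:02d}:{start % 60:02d}-{end // 60:02d}:{end % 60:02d}"
--
--
-- def _compute_slot_label_map(slot_count, slot_times, slot_duration):
--     n = max(slot_count, 0)
--     # pass 1: start minutes for the slots that have a configured time string
--     starts = []
--     last = None
--     for t in slot_times[:n]:
--         try:
--             h, m = str(t).split(':')
--             last = int(h) * 60 + int(m)
--         except Exception:
--             last = last + slot_duration if last is not None else 510
--         starts.append(last)
--     # closed-form tail: beyond the configured times every start just advances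
--     # by slot_duration (from 510 when nothing was configured at all)
--     base = last if last is not None else 510 - slot_duration
--     tail = [base + (k + 1) * slot_duration for k in range(n - len(starts))]
--     # pass 2: format
--     return {i: _fmt_label(s, slot_duration) for i, s in enumerate(starts + tail)}
-- ===== Notes on version B (the rewrite author's own statement) =====
-- stated objective: alternative
-- what changed: A interleaves parsing, fallback, dict insertion and label formatting in one loop; B first accumulates the start minutes (one pass over only the configured time strings, with the slots beyond them produced by a closed-form arithmetic progression base + (k+1)*duration instead of iterating the fallback), then formats all labels in a single separate map over enumerate.
import Mathlib
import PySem

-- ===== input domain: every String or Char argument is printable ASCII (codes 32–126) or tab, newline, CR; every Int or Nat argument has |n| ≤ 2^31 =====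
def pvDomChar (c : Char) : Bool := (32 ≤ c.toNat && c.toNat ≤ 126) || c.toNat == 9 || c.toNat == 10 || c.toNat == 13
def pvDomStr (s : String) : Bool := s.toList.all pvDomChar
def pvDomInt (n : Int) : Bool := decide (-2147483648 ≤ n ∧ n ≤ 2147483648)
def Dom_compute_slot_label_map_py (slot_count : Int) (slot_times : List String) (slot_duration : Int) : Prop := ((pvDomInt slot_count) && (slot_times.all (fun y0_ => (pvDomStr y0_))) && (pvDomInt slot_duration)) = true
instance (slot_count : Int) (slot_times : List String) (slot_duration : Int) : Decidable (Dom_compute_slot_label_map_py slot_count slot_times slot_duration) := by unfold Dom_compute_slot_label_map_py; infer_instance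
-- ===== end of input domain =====

-- B replaces A's single interleaved loop (dict built while parsing-or-falling-back) by
-- accumulate-then-map: one pass over the configured time strings only, a CLOSED-FORM
-- arithmetic progression for the slots beyond them, and a single formatting map at the end.
-- (objective: alternative decomposition; same asymptotic cost)

-- shared helpers: both Pythons contain the identical f-string and the identical
-- try-int-parse / fallback expression, ported once here
-- fallback start: (last + slot_duration) if last is not None else 8*60+30
def pvFb (last : Option Int) (dur : Int) : Int :=
  match last with
  | some l => l + dur
  | none => 510

-- 'hours, minutes = map(int, str(t).split(":")); hours*60+minutes'; none = any Exception
def pvParse? (t : String) : Option Int :=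
  match PySem.Str.split? t ":" with
  | some [a, b] =>
    match PySem.Int.ofStr? a, PySem.Int.ofStr? b with
    | some h, some m => some (h * 60 + m)
    | _, _ => none
  | _ => none

-- f"{n:02d}"
def pvFmt2 (n : Int) : List Char := PySem.Chars.zfill (PySem.Int.toChars n) 2

-- f"{start//60:02d}:{start%60:02d}-{end//60:02d}:{end%60:02d}"
def pvLabel (start dur : Int) : String :=
  let e := start + dur
  String.ofList (pvFmt2 (PySem.Int.floordiv start 60) ++ ':' :: pvFmt2 (PySem.Int.mod start 60) ++
             '-' :: pvFmt2 (PySem.Int.floordiv e 60) ++ ':' :: pvFmt2 (PySem.Int.mod e 60))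

-- ===== PORT A =====
def compute_slot_label_map_py (slot_count : Int) (slot_times : List String) (slot_duration : Int) : List (Int × String) :=
  let st := (PySem.List.pyRange 0 slot_count 1).foldl
    (fun (st : PySem.Dict Int String × Option Int) idx =>
      let start : Int :=
        if idx < (slot_times.length : Int) then
          -- slot_times[idx]: idx ∈ [0, len) here, so the index is always in range
          match pvParse? (PySem.List.pyGetD slot_times idx "") with
          | some s => s
          | none => pvFb st.2 slot_duration
        else pvFb st.2 slot_duration
      (st.1.insert idx (pvLabel start slot_duration), some start))
    ((PySem.Dict.empty : PySem.Dict Int String), (none : Option Int))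
  st.1.items

-- ===== PORT B =====
def compute_slot_label_map_py_alt (slot_count : Int) (slot_times : List String) (slot_duration : Int) : List (Int × String) :=
  let n : Int := max slot_count 0
  -- pass 1: for t in slot_times[:n]: starts.append(parse-or-fallback)
  let st := (PySem.List.slice slot_times none (some n)).foldl
    (fun (st : List Int × Option Int) t =>
      let last : Int :=
        match pvParse? t with
        | some v => v
        | none => pvFb st.2 slot_duration
      (st.1 ++ [last], some last))
    (([] : List Int), (none : Option Int))
  let base : Int :=
    match st.2 with
    | some l => l
    | none => 510 - slot_duration
  -- closed-form tail
  let tail := (PySem.List.pyRange 0 (n - (st.1.length : Int)) 1).map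
    (fun k => base + (k + 1) * slot_duration)
  -- pass 2: dict comprehension over enumerate — keys 0,1,2,… are fresh and increasing,
  -- so the dict's items in insertion order are exactly this list
  (PySem.List.enumerate (st.1 ++ tail)).map (fun p => (p.1, pvLabel p.2 slot_duration))

-- ===== PRECONDITION & SPEC =====
def Spec_compute_slot_label_map_py (slot_count : Int) (slot_times : List String) (slot_duration : Int) (out : List (Int × String)) : Prop := out = compute_slot_label_map_py_alt slot_count slot_times slot_duration
instance (slot_count : Int) (slot_times : List String) (slot_duration : Int) (out : List (Int × String)) : Decidable (Spec_compute_slot_label_map_py slot_count slot_times slot_duration out) := by unfold Spec_compute_slot_label_map_py; infer_instance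

-- ===== CLAIM (what is proved, stated in full; the proofs are below) =====
def Claim_equal_compute_slot_label_map_py : Prop := ∀ (slot_count : Int) (slot_times : List String) (slot_duration : Int), Dom_compute_slot_label_map_py slot_count slot_times slot_duration → Spec_compute_slot_label_map_py slot_count slot_times slot_duration (compute_slot_label_map_py slot_count slot_times slot_duration)

-- ===== LEMMAS AND PROOFS =====

-- reference sequence of start minutes: c slots, remaining configured strings ts, carried last
def pvStarts (ts : List String) (dur : Int) (last : Option Int) : Nat → List Int
  | 0 => []
  | Nat.succ c =>
    match ts with
    | [] =>
      let s := pvFb last dur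
      s :: pvStarts [] dur (some s) c
    | t :: ts' =>
      let s := (pvParse? t).getD (pvFb last dur)
      s :: pvStarts ts' dur (some s) c

-- the carried 'last' after consuming ts
def pvLast (ts : List String) (dur : Int) (last : Option Int) : Option Int :=
  match ts with
  | [] => last
  | t :: ts' => pvLast ts' dur (some ((pvParse? t).getD (pvFb last dur)))

def pvBase (last : Option Int) (dur : Int) : Int :=
  match last with
  | some l => l
  | none => 510 - dur

-- the arithmetic progression B's tail comprehension produces
def pvProg (base dur : Int) : Nat → List Int
  | 0 => []
  | Nat.succ c => (base + dur) :: pvProg (base + dur) dur c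

theorem pvFb_eq_base_add (last : Option Int) (dur : Int) : pvFb last dur = pvBase last dur + dur := by
  cases last <;> simp [pvFb, pvBase]

theorem length_pvStarts (dur : Int) :
    ∀ (c : Nat) (ts : List String) (last : Option Int), (pvStarts ts dur last c).length = c := by
  intro c
  induction c with
  | zero => intro ts last; simp [pvStarts]
  | succ c ih => intro ts last; cases ts <;> simp [pvStarts, ih]

theorem pvProg_eq (dur : Int) :
    ∀ (c : Nat) (base : Int),
    pvProg base dur c = (List.range c).map (fun (k : Nat) => base + ((k : Int) + 1) * dur) := by
  intro c
  induction c with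
  | zero => intro base; simp [pvProg]
  | succ c ih =>
    intro base
    rw [List.range_succ_eq_map, List.map_cons, List.map_map]
    simp only [pvProg, ih]
    congr 1
    · push_cast; ring
    · apply List.map_congr_left
      intro k _
      simp only [Function.comp_apply]
      push_cast
      ring

-- no configured strings left: the reference sequence is the arithmetic progression
theorem pvStarts_nil (dur : Int) :
    ∀ (c : Nat) (last : Option Int),
    pvStarts [] dur last c = pvProg (pvBase last dur) dur c := by
  intro c
  induction c with
  | zero => intro last; rfl
  | succ c ih =>
    intro last
    simp only [pvStarts, pvProg, ih]
    rw [pvFb_eq_base_add]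
    congr 1

-- splitting the reference sequence at the end of the configured strings
theorem pvStarts_split (dur : Int) :
    ∀ (c : Nat) (ts : List String) (last : Option Int),
    pvStarts ts dur last c
      = pvStarts (ts.take c) dur last (ts.take c).length
        ++ pvStarts [] dur (pvLast (ts.take c) dur last) (c - (ts.take c).length) := by
  intro c
  induction c with
  | zero => intro ts last; simp [pvStarts]
  | succ c ih =>
    intro ts last
    cases ts with
    | nil => simp [pvStarts, pvLast]
    | cons t ts' =>
      simp only [List.take_succ_cons, List.length_cons, pvStarts, pvLast, List.cons_append]
      rw [ih ts' (some ((pvParse? t).getD (pvFb last dur)))]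
      simp [Nat.succ_sub_succ]

-- A's fold, characterized against the reference sequence
theorem A_fold (slot_times : List String) (dur : Int) :
    ∀ (c i : Nat) (d : PySem.Dict Int String) (last : Option Int),
    (∀ j : Int, (i : Int) ≤ j → d.contains j = false) →
    ((PySem.List.pyRange i ((i : Int) + (c : Int)) 1).foldl
      (fun (st : PySem.Dict Int String × Option Int) idx =>
        let start : Int :=
          if idx < (slot_times.length : Int) then
            match pvParse? (PySem.List.pyGetD slot_times idx "") with
            | some s => s
            | none => pvFb st.2 dur
          else pvFb st.2 dur
        (st.1.insert idx (pvLabel start dur), some start))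
      (d, last)).1.items
    = d.items ++ (PySem.List.enumerate (pvStarts (slot_times.drop i) dur last c) (i : Int)).map
        (fun p => (p.1, pvLabel p.2 dur)) := by
  intro c
  induction c with
  | zero =>
    intro i d last _
    rw [PySem.List.pyRange_one_eq_nil (by omega)]
    simp [pvStarts]
  | succ c ih =>
    intro i d last hfresh
    rw [PySem.List.pyRange_one_cons (by push_cast; omega), List.foldl_cons]
    have hstep :
        (let start : Int :=
          if (i : Int) < (slot_times.length : Int) then
            match pvParse? (PySem.List.pyGetD slot_times (i : Int) "") with
            | some s => s
            | none => pvFb (d, last).2 dur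
          else pvFb (d, last).2 dur
        ((d, last).1.insert (i : Int) (pvLabel start dur), some start))
        = (d.insert (i : Int) (pvLabel (((pvStarts (slot_times.drop i) dur last (c+1)).headD 0)) dur),
           some ((pvStarts (slot_times.drop i) dur last (c+1)).headD 0)) := by
      by_cases hi : i < slot_times.length
      · have hdrop := List.drop_eq_getElem_cons hi
        simp only [hdrop, pvStarts, List.headD_cons]
        have hcond : ((i : Int) < (slot_times.length : Int)) := by exact_mod_cast hi
        simp only [if_pos hcond, PySem.List.pyGetD_natCast, List.getD_eq_getElem?_getD,
          List.getElem?_eq_getElem hi, Option.getD_some]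
        cases hp : pvParse? slot_times[i] <;> simp [Option.getD]
      · have hdrop : slot_times.drop i = [] := List.drop_eq_nil_of_le (by omega)
        have hcond : ¬ ((i : Int) < (slot_times.length : Int)) := by omega
        simp only [if_neg hcond, hdrop, pvStarts, List.headD_cons]
    rw [hstep]
    have hfresh' : ∀ j : Int, ((i + 1 : Nat) : Int) ≤ j →
        (d.insert (i : Int) (pvLabel ((pvStarts (slot_times.drop i) dur last (c+1)).headD 0) dur)).contains j = false := by
      intro j hj
      rw [PySem.Dict.contains_insert]
      have h1 : (j == (i : Int)) = false := by simp; push_cast at hj ⊢; omega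
      rw [h1, hfresh j (by push_cast at hj ⊢; omega)]
      simp
    have := ih (i + 1) _ (some ((pvStarts (slot_times.drop i) dur last (c+1)).headD 0)) hfresh'
    push_cast at this ⊢
    rw [show (i : Int) + ((c : Int) + 1) = (i : Int) + 1 + (c : Int) by ring, this]
    rw [PySem.Dict.items_insert_of_not_contains d _ (hfresh (i : Int) le_rfl)]
    by_cases hi : i < slot_times.length
    · have hdrop := List.drop_eq_getElem_cons hi
      have hdrop1 : slot_times.drop (i + 1) = (slot_times.drop i).tail := by
        rw [hdrop]; rfl
      rw [hdrop1, hdrop]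
      simp only [pvStarts, List.headD_cons, List.tail_cons, PySem.List.enumerate_cons, List.map_cons,
        List.append_assoc, List.cons_append, List.nil_append]
    · have hdrop : slot_times.drop i = [] := List.drop_eq_nil_of_le (by omega)
      have hdrop1 : slot_times.drop (i + 1) = [] := List.drop_eq_nil_of_le (by omega)
      rw [hdrop, hdrop1]
      simp only [pvStarts, List.headD_cons, PySem.List.enumerate_cons, List.map_cons,
        List.append_assoc, List.cons_append, List.nil_append]

-- B's fold, characterized
theorem B_fold (dur : Int) :
    ∀ (ts : List String) (acc : List Int) (last : Option Int),
    (ts.foldl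
      (fun (st : List Int × Option Int) t =>
        let l : Int :=
          match pvParse? t with
          | some v => v
          | none => pvFb st.2 dur
        (st.1 ++ [l], some l))
      (acc, last))
    = (acc ++ pvStarts ts dur last ts.length, pvLast ts dur last) := by
  intro ts
  induction ts with
  | nil => intro acc last; simp [pvStarts, pvLast]
  | cons t ts ih =>
    intro acc last
    simp only [List.foldl_cons, List.length_cons, ih, pvStarts, pvLast, List.append_assoc]
    rcases h : pvParse? t with _ | v <;> simp

-- ===== VERDICT (by name: the statement is the Claim_ definition above) =====
theorem compute_slot_label_map_py_spec : Claim_equal_compute_slot_label_map_py := by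
  intro sc ts dur _
  unfold Spec_compute_slot_label_map_py compute_slot_label_map_py compute_slot_label_map_py_alt
  by_cases hsc : sc ≤ 0
  · have h2 : max sc 0 = 0 := by omega
    rw [h2]
    dsimp only
    rw [PySem.List.pyRange_one_eq_nil hsc]
    have h3 : PySem.List.slice ts none (some (0 : Int)) = [] := by
      simpa using PySem.List.slice_to_natCast ts 0
    rw [h3]
    simp [PySem.Dict.empty, PySem.List.enumerate_nil, PySem.List.pyRange_one_eq_nil]
  · have hN : ((sc.toNat : Nat) : Int) = sc := Int.toNat_of_nonneg (by omega)
    have hA := A_fold ts dur sc.toNat 0 PySem.Dict.empty none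
      (fun j _ => by simp [PySem.Dict.contains_empty])
    simp only [Nat.cast_zero, zero_add, hN, List.drop_zero] at hA
    have hempty : (PySem.Dict.empty : PySem.Dict Int String).items = [] := rfl
    rw [hempty, List.nil_append] at hA
    have hmax : max sc 0 = sc := by omega
    rw [hmax]
    dsimp only
    rw [hA]
    have hslice : PySem.List.slice ts none (some sc) = ts.take sc.toNat := by
      rw [← hN]; exact PySem.List.slice_to_natCast ts sc.toNat
    rw [hslice]
    have hB := B_fold dur (ts.take sc.toNat) [] none
    rw [List.nil_append] at hB
    rw [hB]
    dsimp only
    have hL : (ts.take sc.toNat).length ≤ sc.toNat := by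
      simp [List.length_take]
    have hlen := length_pvStarts dur (ts.take sc.toNat).length (ts.take sc.toNat) none
    rw [hlen]
    have hbase : (match pvLast (ts.take sc.toNat) dur none with
        | some l => l
        | none => 510 - dur) = pvBase (pvLast (ts.take sc.toNat) dur none) dur := by
      cases pvLast (ts.take sc.toNat) dur none <;> rfl
    rw [hbase]
    have hcnt : sc - ((ts.take sc.toNat).length : Int)
        = ((sc.toNat - (ts.take sc.toNat).length : Nat) : Int) := by
      push_cast [Nat.cast_sub hL]; omega
    rw [hcnt, PySem.List.pyRange_zero_nat, List.map_map]
    have htail : (List.range (sc.toNat - (ts.take sc.toNat).length)).map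
          ((fun k => pvBase (pvLast (ts.take sc.toNat) dur none) dur + (k + 1) * dur) ∘ (fun (k : Nat) => (k : Int)))
        = pvStarts [] dur (pvLast (ts.take sc.toNat) dur none) (sc.toNat - (ts.take sc.toNat).length) := by
      rw [pvStarts_nil, pvProg_eq]
      apply List.map_congr_left
      intro k _
      simp [Function.comp_apply]
    rw [htail, ← pvStarts_split]
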